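-- pv_equiv track=rewrite | github.com/CharlesTPham/GoogleAPACRoundE2017 | BeautifulNumber/BeautifulNumber.py | tryToBuildUp
-- ===== SOURCE A (Python) =====
-- def tryToBuildUp(c, b):
--     # Try to build up c using sums of base b
--     # Maybe numerical error so try to account for that?
--     for guess in range(max(2,b-10), b+10):
--         accum = 1
--         x = 1
--         accum += guess**x
--         while (accum < c):
--             x += 1
--             accum += guess**x
--         if accum == c:
--             return guess
--     return -1
-- ===== SOURCE B (Python) =====
-- def tryToBuildUp(c, b):
--     # Test each candidate base by deconstructing c top-down with division,
--     # instead of building repunit sums bottom-up.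
--     for guess in range(max(2, b - 10), b + 10):
--         n, count = c, 0
--         while n > 0 and n % guess == 1:
--             n //= guess
--             count += 1
--         if n == 0 and count >= 2:
--             return guess
--     return -1
-- ===== Notes on version B (the rewrite author's own statement) =====
-- stated objective: alternative
-- what changed: B checks each candidate base by top-down digit extraction (repeated mod/floordiv of c, verifying every base-guess digit is 1) instead of A's bottom-up accumulation of powers until the repunit sum reaches c.
import Mathlib
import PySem

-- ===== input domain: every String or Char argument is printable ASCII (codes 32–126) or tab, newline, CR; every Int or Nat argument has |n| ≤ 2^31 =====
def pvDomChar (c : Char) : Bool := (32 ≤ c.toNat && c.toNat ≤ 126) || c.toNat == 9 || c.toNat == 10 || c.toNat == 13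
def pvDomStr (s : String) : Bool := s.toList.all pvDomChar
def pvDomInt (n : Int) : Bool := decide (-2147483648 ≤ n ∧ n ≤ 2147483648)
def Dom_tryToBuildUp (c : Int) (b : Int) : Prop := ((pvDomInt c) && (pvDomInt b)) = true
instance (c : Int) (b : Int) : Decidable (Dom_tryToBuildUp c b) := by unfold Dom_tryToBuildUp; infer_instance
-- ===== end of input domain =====

-- B re-checks each candidate base by top-down digit extraction (mod/floordiv) instead of
-- A's bottom-up accumulation of powers; objective: alternative algorithm, same cost.

-- ===== PORT A =====
-- inner while loop of A: while accum < c: x += 1; accum += guess**x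
-- x is always ≥ 1 in Python, so a Nat exponent is exact; the 2 ≤ g hypothesis records that
-- every guess drawn from range(max(2,b-10), b+10) is at least 2 (needed for termination).
def pvLoopA (c g : Int) (hg : 2 ≤ g) (x : Nat) (accum : Int) : Int :=
  if accum < c then pvLoopA c g hg (x + 1) (accum + g ^ (x + 1)) else accum
termination_by (c - accum).toNat
decreasing_by
  have hp : 0 < g ^ (x + 1) := pow_pos (by omega) _
  omega

-- the for-loop over the guesses
def pvGoA (c : Int) : (l : List Int) → (∀ g ∈ l, 2 ≤ g) → Int
  | [], _ => -1
  | g :: rest, h =>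
    -- accum = 1; x = 1; accum += guess**x
    let accum := pvLoopA c g (h g (List.mem_cons_self ..)) 1 (1 + g ^ (1 : Nat))
    if accum = c then g
    else pvGoA c rest (fun g' hg' => h g' (List.mem_cons_of_mem _ hg'))

def tryToBuildUp (c : Int) (b : Int) : Int :=
  pvGoA c (PySem.List.pyRange (max 2 (b - 10)) (b + 10) 1)
    (fun g hg => le_trans (le_max_left 2 (b - 10)) (PySem.List.mem_pyRange_one.mp hg).1)

-- ===== PORT B =====
-- inner while loop of B: while n > 0 and n % guess == 1: n //= guess; count += 1
def pvLoopB (g : Int) (hg : 2 ≤ g) (n : Int) (count : Nat) : Int × Nat :=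
  if h : 0 < n ∧ PySem.Int.mod n g = 1 then
    pvLoopB g hg (PySem.Int.floordiv n g) (count + 1)
  else (n, count)
termination_by n.toNat
decreasing_by
  rw [PySem.Int.floordiv_eq_ediv_of_pos (by omega : (0:Int) < g)]
  have h1 : n / g < n := by
    rw [Int.ediv_lt_iff_lt_mul (by omega)]
    nlinarith
  omega

def pvGoB (c : Int) : (l : List Int) → (∀ g ∈ l, 2 ≤ g) → Int
  | [], _ => -1
  | g :: rest, h =>
    let p := pvLoopB g (h g (List.mem_cons_self ..)) c 0
    if p.1 = 0 ∧ 2 ≤ p.2 then g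
    else pvGoB c rest (fun g' hg' => h g' (List.mem_cons_of_mem _ hg'))

def tryToBuildUp_alt (c : Int) (b : Int) : Int :=
  pvGoB c (PySem.List.pyRange (max 2 (b - 10)) (b + 10) 1)
    (fun g hg => le_trans (le_max_left 2 (b - 10)) (PySem.List.mem_pyRange_one.mp hg).1)

-- ===== PRECONDITION & SPEC =====
def Spec_tryToBuildUp (c : Int) (b : Int) (out : Int) : Prop := out = tryToBuildUp_alt c b
instance (c : Int) (b : Int) (out : Int) : Decidable (Spec_tryToBuildUp c b out) := by unfold Spec_tryToBuildUp; infer_instance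

-- ===== CLAIM (what is proved, stated in full; the proofs are below) =====
def Claim_equal_tryToBuildUp : Prop := ∀ (c : Int) (b : Int), Dom_tryToBuildUp c b → Spec_tryToBuildUp c b (tryToBuildUp c b)

-- ===== LEMMAS AND PROOFS =====

-- rep g k = the base-g repunit with k digits: 1 + g + … + g^(k-1)
def pvRep (g : Int) : Nat → Int
  | 0 => 0
  | k + 1 => g * pvRep g k + 1

theorem pvRep_succ_pow (g : Int) (k : Nat) : pvRep g (k + 1) = pvRep g k + g ^ k := by
  induction k with
  | zero => simp [pvRep]
  | succ k ih =>
    have ih' : g * pvRep g k + 1 = pvRep g k + g ^ k := ih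
    rw [show pvRep g (k + 1 + 1) = g * pvRep g (k + 1) + 1 from rfl,
        show pvRep g (k + 1) = g * pvRep g k + 1 from rfl]
    linear_combination g * ih'

theorem pvRep_nonneg (g : Int) (hg : 2 ≤ g) (k : Nat) : 0 ≤ pvRep g k := by
  induction k with
  | zero => simp [pvRep]
  | succ k ih =>
    have h2 : 0 ≤ g * pvRep g k := mul_nonneg (by omega) ih
    simp only [pvRep]; omega

theorem pvRep_strictMono (g : Int) (hg : 2 ≤ g) {k m : Nat} (h : k < m) :
    pvRep g k < pvRep g m := by
  have : StrictMono (pvRep g) := by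
    apply strictMono_nat_of_lt_succ
    intro n
    rw [pvRep_succ_pow]
    have := pow_pos (show (0:Int) < g by omega) n
    omega
  exact this h

theorem pvLoopA_iff (c g : Int) (hg : 2 ≤ g) (x : Nat) :
    (pvLoopA c g hg x (pvRep g (x + 1)) = c) ↔ ∃ k, x + 1 ≤ k ∧ pvRep g k = c := by
  rw [pvLoopA]
  by_cases hlt : pvRep g (x + 1) < c
  · rw [if_pos hlt, show pvRep g (x + 1) + g ^ (x + 1) = pvRep g (x + 1 + 1) from (pvRep_succ_pow g (x+1)).symm,
        pvLoopA_iff c g hg (x + 1)]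
    constructor
    · rintro ⟨k, hk, hrep⟩; exact ⟨k, by omega, hrep⟩
    · rintro ⟨k, hk, hrep⟩
      refine ⟨k, ?_, hrep⟩
      rcases Nat.lt_or_ge (x + 1) k with h | h
      · omega
      · exfalso; have : k = x + 1 := by omega
        subst this; omega
  · rw [if_neg hlt]
    constructor
    · intro h; exact ⟨x + 1, le_refl _, h⟩
    · rintro ⟨k, hk, hrep⟩
      rcases eq_or_lt_of_le hk with h | h
      · rw [← h] at hrep; exact hrep
      · exfalso
        have := pvRep_strictMono g hg h
        omega
termination_by (c - pvRep g (x + 1)).toNat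
decreasing_by
  have h1 : pvRep g (x + 1 + 1) = pvRep g (x + 1) + g ^ (x + 1) := pvRep_succ_pow g (x + 1)
  have hp : 0 < g ^ (x + 1) := pow_pos (by omega) _
  omega

theorem pvLoopB_of_rep (g : Int) (hg : 2 ≤ g) (k count : Nat) :
    pvLoopB g hg (pvRep g k) count = (0, count + k) := by
  induction k generalizing count with
  | zero => rw [pvLoopB]; simp [pvRep]
  | succ k ih =>
    have hr : 0 ≤ pvRep g k := pvRep_nonneg g hg k
    have hgr : 0 ≤ g * pvRep g k := mul_nonneg (by omega) hr
    have hpos : 0 < pvRep g (k + 1) := by simp only [pvRep]; omega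
    have hmod : PySem.Int.mod (pvRep g (k + 1)) g = 1 := by
      rw [PySem.Int.mod_eq_emod_of_pos (by omega : (0:Int) < g)]
      show (g * pvRep g k + 1) % g = 1
      rw [add_comm, Int.add_mul_emod_self_left]
      exact Int.emod_eq_of_lt (by omega) (by omega)
    have hdiv : PySem.Int.floordiv (pvRep g (k + 1)) g = pvRep g k := by
      rw [PySem.Int.floordiv_eq_ediv_of_pos (by omega : (0:Int) < g)]
      show (g * pvRep g k + 1) / g = pvRep g k
      rw [add_comm, Int.add_mul_ediv_left 1 (pvRep g k) (by omega : g ≠ 0),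
          Int.ediv_eq_zero_of_lt (by omega) (by omega)]
      omega
    rw [pvLoopB, dif_pos ⟨hpos, hmod⟩, hdiv, ih]
    congr 1
    omega

theorem pvLoopB_sound (g : Int) (hg : 2 ≤ g) (n : Int) (count m : Nat)
    (h : pvLoopB g hg n count = (0, m)) : count ≤ m ∧ n = pvRep g (m - count) := by
  rw [pvLoopB] at h
  by_cases hc : 0 < n ∧ PySem.Int.mod n g = 1
  · rw [dif_pos hc] at h
    obtain ⟨h1, h2⟩ := pvLoopB_sound g hg (PySem.Int.floordiv n g) (count + 1) m h
    refine ⟨by omega, ?_⟩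
    have hmc : m - count = (m - (count + 1)) + 1 := by omega
    rw [hmc, show pvRep g ((m - (count+1)) + 1) = g * pvRep g (m - (count+1)) + 1 from rfl, ← h2]
    have hfm := PySem.Int.floordiv_mul_add_mod n g
    rw [hc.2] at hfm
    rw [mul_comm]
    omega
  · rw [dif_neg hc] at h
    have hn : n = 0 := congrArg Prod.fst h
    have hcm : count = m := congrArg Prod.snd h
    subst hcm
    simp [hn, pvRep]
termination_by n.toNat
decreasing_by
  rw [PySem.Int.floordiv_eq_ediv_of_pos (by omega : (0:Int) < g)]
  have h1 : n / g < n := by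
    rw [Int.ediv_lt_iff_lt_mul (by omega)]
    nlinarith
  omega

-- per-guess equivalence of the two tests
theorem pvGuess_iff (c g : Int) (hg : 2 ≤ g) :
    (pvLoopA c g hg 1 (1 + g ^ (1 : Nat)) = c) ↔
      ((pvLoopB g hg c 0).1 = 0 ∧ 2 ≤ (pvLoopB g hg c 0).2) := by
  have hinit : 1 + g ^ (1 : Nat) = pvRep g 2 := by simp [pvRep]; ring
  rw [hinit, pvLoopA_iff c g hg 1]
  constructor
  · rintro ⟨k, hk, hrep⟩
    rw [← hrep, pvLoopB_of_rep g hg k 0]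
    exact ⟨rfl, by omega⟩
  · rintro ⟨h0, h2⟩
    have hpair : pvLoopB g hg c 0 = (0, (pvLoopB g hg c 0).2) := by
      exact Prod.ext h0 rfl
    obtain ⟨_, hrep⟩ := pvLoopB_sound g hg c 0 _ hpair
    exact ⟨(pvLoopB g hg c 0).2, by omega, by simpa using hrep.symm⟩

theorem pvGo_eq (c : Int) (l : List Int) (h : ∀ g ∈ l, 2 ≤ g) :
    pvGoA c l h = pvGoB c l h := by
  induction l with
  | nil => rfl
  | cons g rest ih =>
    simp only [pvGoA, pvGoB]
    rw [if_congr (pvGuess_iff c g (h g (List.mem_cons_self ..))) rfl rfl]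
    split
    · rfl
    · exact ih _

-- ===== VERDICT (by name: the statement is the Claim_ definition above) =====
theorem tryToBuildUp_spec : Claim_equal_tryToBuildUp := by
  intro c b _
  show tryToBuildUp c b = tryToBuildUp_alt c b
  exact pvGo_eq c _ _
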